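-- pv_equiv track=rewrite | github.com/DOL-Translations/homeland | tools/patch_cndy.py | extract_string_offsets
-- ===== SOURCE A (Python) =====
-- def extract_string_offsets(data, start_address, num_strings):
--     offsets = []
--     current_offset = start_address
--
--     for _ in range(num_strings):
--         if current_offset >= len(data):
--             break
--
--         offsets.append(current_offset)
--
--         # Move to the next string (find the next null terminator)
--         while current_offset < len(data) and data[current_offset] != 0x00:
--             current_offset += 1
--
--         # Move past the null terminator
--         current_offset += 1
--
--     return offsets
-- ===== SOURCE B (Python) =====
-- import bisect
--
-- def extract_string_offsets(data, start_address, num_strings):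
--     # Precompute positions of null terminators once, then jump with binary search.
--     nulls = [i for i, b in enumerate(data) if b == 0]
--     offsets = []
--     current = start_address
--     for _ in range(num_strings):
--         if current >= len(data):
--             break
--         offsets.append(current)
--         j = bisect.bisect_left(nulls, current)
--         current = nulls[j] + 1 if j < len(nulls) else len(data)
--     return offsets
-- ===== Notes on version B (the rewrite author's own statement) =====
-- stated objective: alternative
-- what changed: B precomputes the list of null-terminator positions once and replaces A's inner byte-by-byte while-scan by a bisect_left binary-search jump into that table.
-- outside the precondition, e.g. on extract_string_offsets([1, 0], -1, 2): A returns [-1, 0], B returns [-1]; on extract_string_offsets([1, 2], -5, 1): A raises IndexError, B returns [-5]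
import Mathlib
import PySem

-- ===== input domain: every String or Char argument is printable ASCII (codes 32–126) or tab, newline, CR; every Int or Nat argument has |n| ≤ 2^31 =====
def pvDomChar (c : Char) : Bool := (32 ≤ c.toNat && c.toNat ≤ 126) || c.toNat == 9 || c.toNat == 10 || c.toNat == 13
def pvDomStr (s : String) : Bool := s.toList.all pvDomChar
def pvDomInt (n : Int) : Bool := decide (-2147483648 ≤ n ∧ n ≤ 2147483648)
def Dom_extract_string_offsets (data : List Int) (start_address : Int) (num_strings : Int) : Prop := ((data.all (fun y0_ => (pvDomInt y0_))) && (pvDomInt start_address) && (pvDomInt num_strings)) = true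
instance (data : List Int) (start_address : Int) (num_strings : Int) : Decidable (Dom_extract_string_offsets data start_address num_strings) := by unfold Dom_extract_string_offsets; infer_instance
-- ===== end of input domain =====

-- B replaces A's inner byte-by-byte scan for the next null terminator by a precomputed
-- list of null positions plus a bisect jump (objective: alternative decomposition).

-- ===== PORT A =====
-- inner while loop: advance c while c < len(data) and data[c] != 0
def pvFindNull (data : List Int) (c : Nat) : Nat :=
  if h : c < data.length then
    (if data.getD c 0 = 0 then c else pvFindNull data (c + 1))
  else c
termination_by data.length - c

-- for _ in range(num_strings): … break / append / inner while / current += 1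
def pvALoop (data : List Int) : Nat → Int → List Int
  | 0, _ => []
  | n + 1, current =>
    if (data.length : Int) ≤ current then []
    else current :: pvALoop data n ((pvFindNull data current.toNat : Int) + 1)

def extract_string_offsets (data : List Int) (start_address : Int) (num_strings : Int) : List Int :=
  pvALoop data num_strings.toNat start_address

-- ===== PORT B =====
-- nulls = [i for i, b in enumerate(data) if b == 0]
def pvNulls (data : List Int) : List Int :=
  ((PySem.List.enumerate data).filter (fun p => p.2 == 0)).map (fun p => p.1)

-- j = bisect.bisect_left(nulls, current); current = nulls[j] + 1 if j < len(nulls) else len(data)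
def pvBStep (data nulls : List Int) (current : Int) : Int :=
  let j := PySem.List.bisectLeft nulls current
  if j < nulls.length then nulls.getD j 0 + 1 else (data.length : Int)

def pvBLoop (data nulls : List Int) : Nat → Int → List Int
  | 0, _ => []
  | n + 1, current =>
    if (data.length : Int) ≤ current then []
    else current :: pvBLoop data nulls n (pvBStep data nulls current)

def extract_string_offsets_alt (data : List Int) (start_address : Int) (num_strings : Int) : List Int :=
  pvBLoop data (pvNulls data) num_strings.toNat start_address

-- ===== PRECONDITION & SPEC =====
-- Pre_ excludes negative start_address, where A's Python-negative-index wraparound behaviour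
-- is accidental (and A raises IndexError for start_address < -len(data)).
def Pre_extract_string_offsets (data : List Int) (start_address : Int) (num_strings : Int) : Prop :=
  0 ≤ start_address
instance (data : List Int) (start_address : Int) (num_strings : Int) : Decidable (Pre_extract_string_offsets data start_address num_strings) := by unfold Pre_extract_string_offsets; infer_instance

def pvWitness_extract_string_offsets : List Int × Int × Int := ([72, 105, 0, 66, 0, 7], 0, 5)

def Spec_extract_string_offsets (data : List Int) (start_address : Int) (num_strings : Int) (out : List Int) : Prop := out = extract_string_offsets_alt data start_address num_strings
instance (data : List Int) (start_address : Int) (num_strings : Int) (out : List Int) : Decidable (Spec_extract_string_offsets data start_address num_strings out) := by unfold Spec_extract_string_offsets; infer_instance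

-- ===== CLAIM (what is proved, stated in full; the proofs are below) =====
def Claim_equal_extract_string_offsets : Prop := ∀ (data : List Int) (start_address : Int) (num_strings : Int), Dom_extract_string_offsets data start_address num_strings → Pre_extract_string_offsets data start_address num_strings → Spec_extract_string_offsets data start_address num_strings (extract_string_offsets data start_address num_strings)

-- ===== LEMMAS AND PROOFS =====

theorem pvWitness_ok : Dom_extract_string_offsets pvWitness_extract_string_offsets.1 pvWitness_extract_string_offsets.2.1 pvWitness_extract_string_offsets.2.2 ∧ Pre_extract_string_offsets pvWitness_extract_string_offsets.1 pvWitness_extract_string_offsets.2.1 pvWitness_extract_string_offsets.2.2 := by decide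

-- membership in the null-position table
theorem mem_pvNulls (data : List Int) (x : Int) :
    x ∈ pvNulls data ↔ ∃ k : Nat, k < data.length ∧ x = (k : Int) ∧ data.getD k 0 = 0 := by
  unfold pvNulls
  simp only [List.mem_map, List.mem_filter, PySem.List.mem_enumerate_iff]
  constructor
  · rintro ⟨⟨i, b⟩, ⟨⟨k, hk, hp⟩, hb⟩, rfl⟩
    cases hp
    exact ⟨k, hk, by simp, by simpa [List.getD, List.getElem?_eq_getElem hk] using (by exact_mod_cast (beq_iff_eq.mp hb) : data[k] = 0)⟩
  · rintro ⟨k, hk, rfl, h0⟩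
    refine ⟨((k : Int), data[k]), ⟨⟨k, hk, by simp⟩, ?_⟩, rfl⟩
    simp only [beq_iff_eq]
    simpa [List.getD, List.getElem?_eq_getElem hk] using h0

theorem pvNulls_sorted (data : List Int) : (pvNulls data).Pairwise (· < ·) := by
  unfold pvNulls
  exact ((PySem.List.pairwise_lt_enumerate data 0).filter _).map _ (fun _ _ h => h)

-- characterisation of A's inner while loop
theorem pvFindNull_spec (data : List Int) (c : Nat) (hc : c ≤ data.length) :
    c ≤ pvFindNull data c ∧ pvFindNull data c ≤ data.length ∧
    (∀ k, c ≤ k → k < pvFindNull data c → data.getD k 0 ≠ 0) ∧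
    (pvFindNull data c < data.length → data.getD (pvFindNull data c) 0 = 0) := by
  by_cases h : c < data.length
  · by_cases h0 : data.getD c 0 = 0
    · rw [pvFindNull, dif_pos h, if_pos h0]
      exact ⟨le_refl _, le_of_lt h, fun k hk hk' => absurd hk' (by omega), fun _ => h0⟩
    · have ih := pvFindNull_spec data (c + 1) (by omega)
      rw [pvFindNull, dif_pos h, if_neg h0]
      refine ⟨by omega, ih.2.1, fun k hk hk' => ?_, ih.2.2.2⟩
      rcases Nat.eq_or_lt_of_le hk with rfl | hlt
      · exact h0
      · exact ih.2.2.1 k hlt hk'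
  · rw [pvFindNull, dif_neg h]
    exact ⟨le_refl _, hc, fun k hk hk' => absurd hk' (by omega), fun hlt => absurd hlt (by omega)⟩
termination_by data.length - c

theorem pvALoop_nil (data : List Int) (n : Nat) (cur : Int)
    (h : (data.length : Int) ≤ cur) : pvALoop data n cur = [] := by
  cases n <;> simp [pvALoop, h]

theorem pvBLoop_nil (data nulls : List Int) (n : Nat) (cur : Int)
    (h : (data.length : Int) ≤ cur) : pvBLoop data nulls n cur = [] := by
  cases n <;> simp [pvBLoop, h]

-- the two loops agree for nonnegative current
theorem loops_agree (data : List Int) (n : Nat) (cur : Int) (hcur : 0 ≤ cur) :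
    pvALoop data n cur = pvBLoop data (pvNulls data) n cur := by
  induction n generalizing cur with
  | zero => rfl
  | succ n ih =>
    rw [pvALoop, pvBLoop]
    by_cases hend : (data.length : Int) ≤ cur
    · simp [hend]
    · rw [if_neg hend, if_neg hend]
      have hclen : cur.toNat < data.length := by omega
      have hspec := pvFindNull_spec data cur.toNat (le_of_lt hclen)
      set r := pvFindNull data cur.toNat with hr
      have hbs := PySem.List.bisectLeft_spec (pvNulls data) cur
        ((pvNulls_sorted data).imp le_of_lt)
      set j := PySem.List.bisectLeft (pvNulls data) cur with hj
      by_cases hjl : j < (pvNulls data).length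
      · -- a null ≥ current exists; both jump to the same place
        have hx := hbs.2.2 j hjl (le_refl _)
        have hmem : (pvNulls data).getD j 0 ∈ pvNulls data := by
          rw [List.getD, List.getElem?_eq_getElem hjl]; exact (List.getElem_mem hjl)
        obtain ⟨k, hk, hxk, hk0⟩ := (mem_pvNulls data _).mp hmem
        have hgd : (pvNulls data).getD j 0 = (pvNulls data)[j] := by
          rw [List.getD, List.getElem?_eq_getElem hjl, Option.getD_some]
        rw [hgd] at hxk
        -- r ≤ k
        have hrk : r ≤ k := by
          by_contra hlt
          exact hspec.2.2.1 k (by omega) (by omega) hk0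
        -- r is itself a null position, hence in the table, at index ≥ j, hence ≥ nulls[j]
        have hrlen : r < data.length := by omega
        have hr0 : data.getD r 0 = 0 := hspec.2.2.2 hrlen
        have hrmem : ((r : Nat) : Int) ∈ pvNulls data :=
          (mem_pvNulls data _).mpr ⟨r, hrlen, rfl, hr0⟩
        obtain ⟨i, hi, hieq⟩ := List.mem_iff_getElem.mp hrmem
        have hji : j ≤ i := by
          by_contra hij
          have := hbs.2.1 i hi (by omega)
          rw [hieq] at this
          omega
        have hle : (pvNulls data).getD j 0 ≤ (r : Int) := by
          rw [hgd]
          rcases Nat.eq_or_lt_of_le hji with rfl | hlt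
          · rw [hieq]
          · have := (List.pairwise_iff_getElem.mp (pvNulls_sorted data)) j i hjl hi hlt
            rw [hieq] at this; exact le_of_lt this
        have heq : (pvNulls data).getD j 0 = (r : Int) := le_antisymm hle (by omega)
        rw [pvBStep]
        simp only [← hj, if_pos hjl, heq]
        exact congrArg (cur :: ·) (ih _ (by positivity))
      · -- no null ≥ current: A runs to len, B jumps to len; both stop next step
        have hrlen : ¬ r < data.length := by
          intro hrl
          have hr0 := hspec.2.2.2 hrl
          have hrmem : ((r : Nat) : Int) ∈ pvNulls data :=
            (mem_pvNulls data _).mpr ⟨r, hrl, rfl, hr0⟩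
          obtain ⟨i, hi, hieq⟩ := List.mem_iff_getElem.mp hrmem
          have := hbs.2.1 i hi (by omega)
          rw [hieq] at this
          omega
        rw [pvBStep]
        simp only [← hj, if_neg hjl]
        rw [pvALoop_nil data n _ (by omega), pvBLoop_nil data _ n _ (le_refl _)]

-- ===== VERDICT (by name: the statement is the Claim_ definition above) =====
theorem extract_string_offsets_spec : Claim_equal_extract_string_offsets := by
  intro data start_address num_strings _ hpre
  unfold Spec_extract_string_offsets extract_string_offsets extract_string_offsets_alt
  exact loops_agree data num_strings.toNat start_address hpre
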